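-- pv_equiv track=rewrite | github.com/daashikaa/tprg | task1/prng.py | bbs
-- ===== SOURCE A (Python) =====
-- def bbs(x0, l, n_ = 10000):
-- 	p = 127
-- 	q = 131
-- 	n = p * q
-- 	x = []
-- 	for _ in range(n_):
-- 		cur = 0
-- 		for _ in range(l):
-- 			x0 = pow(x0, 2, n)
-- 			cur = (cur << 1) | (x0 & 1)
-- 		x.append(cur % 2**10)
-- 	return x
-- ===== SOURCE B (Python) =====
-- def bbs(x0, l, n_=10000):
--     # Flat stream-then-chunk decomposition: produce the whole Blum-Blum-Shub
--     # bit stream in one pass, then cut it into n_ chunks of l bits and fold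
--     # each MSB-first into a 10-bit value.
--     n = 127 * 131
--     l_eff = max(l, 0)
--     m = max(n_, 0)
--     bits = []
--     x = x0
--     for _ in range(l_eff * m):
--         x = (x * x) % n  # == pow(x, 2, n): x*x >= 0 and n > 0
--         bits.append(x & 1)
--     out = []
--     for i in range(m):
--         cur = 0
--         for b in bits[i * l_eff:(i + 1) * l_eff]:
--             cur = cur * 2 + b
--         out.append(cur % 1024)
--     return out
-- ===== Notes on version B (the rewrite author's own statement) =====
-- stated objective: alternative
-- what changed: B replaces A's two nested counting loops by a flat stream-then-chunk decomposition: it generates the entire l*n_ Blum-Blum-Shub bit stream in one pass, then slices it into n_ chunks of l bits and folds each MSB-first into a 10-bit value.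
import Mathlib
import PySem

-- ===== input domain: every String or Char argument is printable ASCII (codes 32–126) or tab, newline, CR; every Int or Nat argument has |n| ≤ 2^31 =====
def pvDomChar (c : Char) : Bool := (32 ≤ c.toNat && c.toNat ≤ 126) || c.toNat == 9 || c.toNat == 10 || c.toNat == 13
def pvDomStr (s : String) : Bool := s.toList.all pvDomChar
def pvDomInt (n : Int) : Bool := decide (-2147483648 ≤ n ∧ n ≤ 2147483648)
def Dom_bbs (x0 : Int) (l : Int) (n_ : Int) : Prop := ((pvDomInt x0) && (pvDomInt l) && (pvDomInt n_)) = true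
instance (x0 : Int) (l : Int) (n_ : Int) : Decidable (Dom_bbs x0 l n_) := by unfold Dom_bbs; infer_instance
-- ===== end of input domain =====

-- B regroups A's nested loops into a flat bit-stream pass followed by chunking/folding; objective: alternative decomposition, same cost.


-- ===== PORT A =====
-- inner loop `for _ in range(l): x0 = pow(x0,2,n); cur = (cur << 1) | (x0 & 1)`.
-- pow(x0,2,n) = PySem.Int.mod (x0*x0) n (nonnegative since n > 0), so `x0 & 1` is
-- PySem.Int.mod x0 2 ∈ {0,1}, and `(cur << 1) | bit` with bit < 2 is 2*cur + bit
-- (the low bit of cur<<1 is 0): exact for the values arising here.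
def bbsInnerA (n : Int) (x : Int) (cur : Int) : Nat → Int × Int
  | 0 => (x, cur)
  | k+1 =>
    let x' := PySem.Int.mod (x*x) n
    bbsInnerA n x' (2*cur + PySem.Int.mod x' 2) k

-- outer loop `for _ in range(n_): … x.append(cur % 2**10)`
def bbsOuterA (n : Int) (l : Nat) (x : Int) (acc : List Int) : Nat → List Int
  | 0 => acc
  | k+1 =>
    let r := bbsInnerA n x 0 l
    bbsOuterA n l r.1 (acc ++ [PySem.Int.mod r.2 1024]) k

def bbs (x0 : Int) (l : Int) (n_ : Int) : List Int :=
  let p : Int := 127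
  let q : Int := 131
  let n := p * q
  bbsOuterA n l.toNat x0 [] n_.toNat

-- ===== PORT B =====
-- flat bit-stream loop `for _ in range(l_eff * m): x = pow(x,2,n); bits.append(x & 1)`
-- (x & 1 = PySem.Int.mod x 2, exact: x is a nonnegative pow result; the growing
-- `bits` list is an Array accumulator so the loop is tail-recursive, as in Python)
def bbsBitsLoop (n : Int) (x : Int) (acc : Array Int) : Nat → Array Int
  | 0 => acc
  | k+1 =>
    let x' := PySem.Int.mod (x*x) n
    bbsBitsLoop n x' (acc.push (PySem.Int.mod x' 2)) k

def bbs_alt (x0 : Int) (l : Int) (n_ : Int) : List Int :=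
  let n : Int := 127 * 131
  let le := max l 0
  let m := max n_ 0
  let bits := (bbsBitsLoop n x0 #[] (le * m).toNat).toList
  (List.range m.toNat).map (fun (i : Nat) =>
    let chunk := PySem.List.slice bits (some (le * (i : Int))) (some (le * ((i : Int) + 1)))
    PySem.Int.mod (chunk.foldl (fun c b => 2*c + b) 0) 1024)

-- ===== PRECONDITION & SPEC =====
def Spec_bbs (x0 : Int) (l : Int) (n_ : Int) (out : List Int) : Prop := out = bbs_alt x0 l n_
instance (x0 : Int) (l : Int) (n_ : Int) (out : List Int) : Decidable (Spec_bbs x0 l n_ out) := by unfold Spec_bbs; infer_instance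

-- ===== CLAIM (what is proved, stated in full; the proofs are below) =====
def Claim_equal_bbs : Prop := ∀ (x0 : Int) (l : Int) (n_ : Int), Dom_bbs x0 l n_ → Spec_bbs x0 l n_ (bbs x0 l n_)

-- ===== LEMMAS AND PROOFS =====

-- pure-list view of the bit stream, for the proofs
def bbsBits (n : Int) (x : Int) : Nat → List Int
  | 0 => []
  | k+1 =>
    let x' := PySem.Int.mod (x*x) n
    PySem.Int.mod x' 2 :: bbsBits n x' k

theorem bbsBitsLoop_toList (n x : Int) (acc : Array Int) (k : Nat) :
    (bbsBitsLoop n x acc k).toList = acc.toList ++ bbsBits n x k := by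
  induction k generalizing x acc with
  | zero => simp [bbsBitsLoop, bbsBits]
  | succ k ih => simp [bbsBitsLoop, bbsBits, ih]

-- state after k squarings
def bbsAdv (n : Int) (x : Int) : Nat → Int
  | 0 => x
  | k+1 => bbsAdv n (PySem.Int.mod (x*x) n) k

theorem bbsBits_length (n x : Int) (k : Nat) : (bbsBits n x k).length = k := by
  induction k generalizing x with
  | zero => rfl
  | succ k ih => simp [bbsBits, ih]

theorem bbsBits_add (n x : Int) (a b : Nat) :
    bbsBits n x (a + b) = bbsBits n x a ++ bbsBits n (bbsAdv n x a) b := by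
  induction a generalizing x with
  | zero => simp [bbsBits, bbsAdv]
  | succ a ih =>
    simp only [Nat.succ_add]
    simp [bbsBits, bbsAdv, ih]

theorem bbsAdv_add (n x : Int) (a b : Nat) :
    bbsAdv n x (a + b) = bbsAdv n (bbsAdv n x a) b := by
  induction a generalizing x with
  | zero => simp [bbsAdv]
  | succ a ih =>
    simp only [Nat.succ_add]
    simp [bbsAdv, ih]

theorem bbsInnerA_eq (n x c : Int) (k : Nat) :
    bbsInnerA n x c k = (bbsAdv n x k, (bbsBits n x k).foldl (fun c b => 2*c + b) c) := by
  induction k generalizing x c with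
  | zero => rfl
  | succ k ih => simp [bbsInnerA, bbsAdv, bbsBits, ih]

theorem bbsOuterA_eq (n : Int) (le : Nat) (x : Int) (acc : List Int) (k : Nat) :
    bbsOuterA n le x acc k =
      acc ++ (List.range k).map (fun i =>
        PySem.Int.mod ((bbsBits n (bbsAdv n x (le * i)) le).foldl (fun c b => 2*c + b) 0) 1024) := by
  induction k generalizing x acc with
  | zero => simp [bbsOuterA]
  | succ k ih =>
    rw [List.range_succ_eq_map]
    simp only [bbsOuterA, bbsInnerA_eq, ih, List.map_cons, List.map_map]
    simp only [bbsAdv, List.append_assoc, List.singleton_append]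
    congr 2
    apply List.map_congr_left
    intro i _
    have : le * (i + 1) = le + le * i := by ring
    simp [Function.comp, this, bbsAdv_add]

theorem bbs_chunk (n x : Int) (le m i : Nat) (hi : i < m) :
    PySem.List.slice (bbsBits n x (le * m)) (some ((le : Int) * (i : Int))) (some ((le : Int) * ((i : Int) + 1))) =
      bbsBits n (bbsAdv n x (le * i)) le := by
  have h1 : (le : Int) * (i : Int) = ((le * i : Nat) : Int) := by push_cast; ring
  have h2 : (le : Int) * ((i : Int) + 1) = ((le * i : Nat) : Int) + ((le : Nat) : Int) := by
    push_cast; ring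
  rw [h1, h2, PySem.List.slice_natCast_add]
  have hm : le * m = le * i + (le + le * (m - i - 1)) := by
    obtain ⟨j, rfl⟩ : ∃ j, m = i + 1 + j := ⟨m - i - 1, by omega⟩
    have hj : i + 1 + j - i - 1 = j := by omega
    rw [hj]; ring
  rw [hm, bbsBits_add, bbsBits_add]
  rw [List.drop_left' (by rw [bbsBits_length]), List.take_left' (by rw [bbsBits_length])]

-- ===== VERDICT (by name: the statement is the Claim_ definition above) =====
theorem bbs_spec : Claim_equal_bbs := by
  intro x0 l n_ _
  show bbs x0 l n_ = bbs_alt x0 l n_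
  unfold bbs bbs_alt
  rw [bbsOuterA_eq]
  have hle : max l 0 = ((l.toNat : Nat) : Int) := (Int.ofNat_toNat l).symm
  have hne : max n_ 0 = ((n_.toNat : Nat) : Int) := (Int.ofNat_toNat n_).symm
  have hm : (max n_ 0).toNat = n_.toNat := by omega
  have hlm : (max l 0 * max n_ 0).toNat = l.toNat * n_.toNat := by
    rw [hle, hne, ← Nat.cast_mul, Int.toNat_natCast]
  simp only [hlm]
  rw [bbsBitsLoop_toList]
  simp only [List.nil_append, hm, hle]
  apply List.map_congr_left
  intro i hi
  rw [bbs_chunk _ _ _ _ _ (List.mem_range.mp hi)]
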